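-- pv_equiv track=rewrite | github.com/2UJ1N/Programmers | step1-8.py | solution
-- ===== SOURCE A (Python) =====
-- def solution(satisfy, k):
--
--     first = satisfy.index(max(satisfy))
--     answer = 0
--
--     # 만족도 최대인 사람이 먹을 때
--     answer += max(satisfy)
--
--     if first == len(satisfy) - 1:
--         satisfy[0] = 0
--         satisfy[first] = 0
--         satisfy[first - 1] = 0
--     elif first == 0:
--         satisfy[len(satisfy) - 1] = 0
--         satisfy[first] = 0
--         satisfy[first + 1] = 0
--     else:
--         satisfy[first - 1] = 0
--         satisfy[first] = 0
--         satisfy[first + 1] = 0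
--
--     k -= 1
--
--     while k > 0:
--         next = satisfy.index(max(satisfy))
--         answer += max(satisfy)
--         k -= 1
--
--         if next == len(satisfy) - 1:
--             satisfy[0] = 0
--             satisfy[next] = 0
--             satisfy[next - 1] = 0
--         elif next == 0:
--             satisfy[len(satisfy) - 1] = 0
--             satisfy[next] = 0
--             satisfy[next + 1] = 0
--         else:
--             satisfy[next - 1] = 0
--             satisfy[next] = 0
--             satisfy[next + 1] = 0
--
--     # 만족도 최대인 사람이 못 먹을 때 -> 양 옆이 먹어야 함
--
--     return answer
-- ===== SOURCE B (Python) =====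
-- # Faster: sort the indices by descending value once; the first pick is simply order[0],
-- # and each later pick advances a pointer over that order, skipping already-zeroed slots;
-- # once every remaining candidate is <= 0 the current maximum is a zeroed slot worth 0,
-- # so the total can no longer change and the loop stops early.
-- # O(n log n + k) instead of rescanning the whole list on every pick.
-- # (A mutates its `satisfy` argument in place; B does not - return values agree.)
-- def solution(satisfy, k):
--     n = len(satisfy)
--     order = sorted(range(n), key=lambda i: -satisfy[i])
--     first = order[0]
--     total = satisfy[first]
--     zeroed = [False] * n
--     for j in ((first - 1) % n, first, (first + 1) % n):
--         zeroed[j] = True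
--     p = 0
--     for _ in range(k - 1):
--         while p < n and zeroed[order[p]]:
--             p += 1
--         if p == n or satisfy[order[p]] <= 0:
--             break
--         i = order[p]
--         total += satisfy[i]
--         for j in ((i - 1) % n, i, (i + 1) % n):
--             zeroed[j] = True
--     return total
-- ===== Notes on version B (the rewrite author's own statement) =====
-- stated objective: faster
-- what changed: B sorts the indices once by descending value and walks that order with a pointer that skips zeroed slots, stopping early once every remaining candidate is <= 0 (from then on each pick is a zeroed slot worth 0), instead of A's rescanning the whole list (max twice plus index) on every pick; B also does not mutate the input list.
import Mathlib
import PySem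

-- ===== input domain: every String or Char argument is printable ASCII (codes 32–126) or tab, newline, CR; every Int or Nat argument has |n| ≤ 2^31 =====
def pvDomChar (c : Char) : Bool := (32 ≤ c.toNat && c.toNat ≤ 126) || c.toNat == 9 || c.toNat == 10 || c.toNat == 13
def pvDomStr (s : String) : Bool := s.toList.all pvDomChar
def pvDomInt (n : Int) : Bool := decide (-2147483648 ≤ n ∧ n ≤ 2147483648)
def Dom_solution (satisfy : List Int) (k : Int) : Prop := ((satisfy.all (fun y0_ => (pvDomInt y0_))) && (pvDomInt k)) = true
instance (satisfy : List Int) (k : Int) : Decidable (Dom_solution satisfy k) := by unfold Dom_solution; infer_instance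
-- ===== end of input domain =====

-- B sorts the indices by descending value once and walks that order with a pointer that
-- skips zeroed slots, stopping early once every remaining candidate is ≤ 0 (measured
-- faster); A mutates its `satisfy` argument in place, B does not — the equivalence
-- proved here is about the return value.

-- ===== PORT A =====
-- max(satisfy) (first maximal element)
def pvMaxA (l : List Int) : Int := (PySem.List.max? l (fun x => x)).getD 0

-- satisfy.index(m) (Python raises if absent; here m is always a member)
def pvIdxA (l : List Int) (m : Int) : Int := (((PySem.List.index? l m).getD 0 : Nat) : Int)

-- the three-branch neighbour zeroing of A (satisfy[first-1] may be the Python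
-- negative index -1 when the list has one element; pySetD is exact there)
def pvZeroA (l : List Int) (j : Int) : List Int :=
  if j = (l.length : Int) - 1 then
    PySem.List.pySetD (PySem.List.pySetD (PySem.List.pySetD l 0 0) j 0) (j - 1) 0
  else if j = 0 then
    PySem.List.pySetD (PySem.List.pySetD (PySem.List.pySetD l ((l.length : Int) - 1) 0) j 0) (j + 1) 0
  else
    PySem.List.pySetD (PySem.List.pySetD (PySem.List.pySetD l (j - 1) 0) j 0) (j + 1) 0

-- the `while k > 0` loop of A
def pvLoopA (l : List Int) (k : Int) (answer : Int) : Int :=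
  if _h : 0 < k then
    let m := pvMaxA l
    let nxt := pvIdxA l m
    pvLoopA (pvZeroA l nxt) (k - 1) (answer + m)
  else answer
termination_by k.toNat
decreasing_by omega

def solution (satisfy : List Int) (k : Int) : Int :=
  let m := pvMaxA satisfy
  let first := pvIdxA satisfy m
  pvLoopA (pvZeroA satisfy first) (k - 1) (0 + m)

-- ===== PORT B =====
-- order = sorted(range(n), key=lambda i: -satisfy[i])
def pvOrdB (satisfy : List Int) : List Int :=
  PySem.List.sorted (PySem.List.pyRange 0 (satisfy.length : Int) 1)
    (fun i => -(PySem.List.pyGetD satisfy i 0)) false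

-- for j in ((i-1) % n, i, (i+1) % n): zeroed[j] = True
def pvMark (zeroed : List Bool) (i n : Int) : List Bool :=
  PySem.List.pySetD (PySem.List.pySetD (PySem.List.pySetD zeroed
    (PySem.Int.mod (i - 1) n) true) i true) (PySem.Int.mod (i + 1) n) true

-- while p < n and zeroed[order[p]]: p += 1
def pvSkipB (order : List Int) (zeroed : List Bool) (p : Int) : Int :=
  if h : p < (order.length : Int) ∧
         PySem.List.pyGetD zeroed (PySem.List.pyGetD order p 0) false = true then
    pvSkipB order zeroed (p + 1)
  else p
termination_by ((order.length : Int) - p).toNat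
decreasing_by omega

-- the `for _ in range(k - 1)` loop of B (with its early break); state = (zeroed, p, total)
def pvLoopB (satisfy order : List Int) (n : Int) (zeroed : List Bool)
    (p total : Int) : Nat → Int
  | 0 => total
  | f + 1 =>
    let p' := pvSkipB order zeroed p
    if p' = n ∨ PySem.List.pyGetD satisfy (PySem.List.pyGetD order p' 0) 0 ≤ 0 then total
    else
      let i := PySem.List.pyGetD order p' 0
      pvLoopB satisfy order n (pvMark zeroed i n) p'
        (total + PySem.List.pyGetD satisfy i 0) f

def solution_alt (satisfy : List Int) (k : Int) : Int :=
  let n : Int := (satisfy.length : Int)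
  let order := pvOrdB satisfy
  let first := PySem.List.pyGetD order 0 0
  pvLoopB satisfy order n (pvMark (List.replicate satisfy.length false) first n) 0
    (PySem.List.pyGetD satisfy first 0) (k - 1).toNat

-- ===== PRECONDITION & SPEC =====
-- Pre_ excludes only the empty list, on which A raises ValueError (max of empty sequence).
def Pre_solution (satisfy : List Int) (k : Int) : Prop := satisfy ≠ []
instance (satisfy : List Int) (k : Int) : Decidable (Pre_solution satisfy k) := by
  unfold Pre_solution; infer_instance

def pvWitness_solution : List Int × Int := ([3, 1, 2, 4], 2)

def Spec_solution (satisfy : List Int) (k : Int) (out : Int) : Prop := out = solution_alt satisfy k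
instance (satisfy : List Int) (k : Int) (out : Int) : Decidable (Spec_solution satisfy k out) := by
  unfold Spec_solution; infer_instance

-- ===== CLAIM (what is proved, stated in full; the proofs are below) =====
def Claim_equal_solution : Prop := ∀ (satisfy : List Int) (k : Int), Dom_solution satisfy k → Pre_solution satisfy k → Spec_solution satisfy k (solution satisfy k)

-- ===== LEMMAS AND PROOFS =====

-- ---- the sort key of B and the strict order its stable sort realises ----
def pvKey (s : List Int) (i : Int) : Int := -(PySem.List.pyGetD s i 0)

def pvLexLt (s : List Int) (a b : Int) : Prop :=
  pvKey s a < pvKey s b ∨ (pvKey s a = pvKey s b ∧ a < b)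

lemma pvLexLt_trans (s : List Int) (a b c : Int) (h1 : pvLexLt s a b)
    (h2 : pvLexLt s b c) : pvLexLt s a c := by
  rcases h1 with h1 | h1 <;> rcases h2 with h2 | h2 <;> simp only [pvLexLt] <;> omega

-- inserting an index larger than everything already placed keeps the list
-- pairwise-(pvLexLt): ties go after (the sort is stable)
lemma pvInsertBy_pairwise (s : List Int) (x : Int) (acc : List Int)
    (hlt : ∀ y ∈ acc, y < x) (hp : acc.Pairwise (pvLexLt s)) :
    (PySem.List.insertBy (fun a b => decide (pvKey s a < pvKey s b)) x acc).Pairwise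
      (pvLexLt s) := by
  induction acc with
  | nil => simp [PySem.List.insertBy]
  | cons y ys ih =>
    simp only [PySem.List.insertBy]
    rcases List.pairwise_cons.mp hp with ⟨hy, hys⟩
    split
    · rename_i hcmp
      have hxy : pvLexLt s x y := Or.inl (by simpa using hcmp)
      refine List.pairwise_cons.mpr ⟨?_, hp⟩
      intro z hz
      rcases List.mem_cons.mp hz with rfl | hz
      · exact hxy
      · exact pvLexLt_trans s x y z hxy (hy z hz)
    · rename_i hcmp
      have hyx : pvLexLt s y x := by
        have h1 : ¬ pvKey s x < pvKey s y := by simpa using hcmp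
        have h2 : y < x := hlt y (List.mem_cons_self ..)
        simp only [pvLexLt]; omega
      refine List.pairwise_cons.mpr
        ⟨?_, ih (fun z hz => hlt z (List.mem_cons_of_mem _ hz)) hys⟩
      intro z hz
      rcases (PySem.List.mem_insertBy _ _ _ _).mp hz with rfl | hz
      · exact hyx
      · exact hy z hz

lemma pvFoldl_insert_pairwise (s : List Int) :
    ∀ (xs acc : List Int), xs.Pairwise (· < ·) → (∀ y ∈ acc, ∀ x ∈ xs, y < x) →
      acc.Pairwise (pvLexLt s) →
      (xs.foldl (fun acc x =>
          PySem.List.insertBy (fun a b => decide (pvKey s a < pvKey s b)) x acc) acc).Pairwise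
        (pvLexLt s)
  | [], _, _, _, hp => hp
  | x :: xs, acc, hxs, hd, hp => by
    simp only [List.foldl_cons]
    rcases List.pairwise_cons.mp hxs with ⟨hx, hxs'⟩
    refine pvFoldl_insert_pairwise s xs _ hxs' ?_
      (pvInsertBy_pairwise s x acc (fun y hy => hd y hy x (List.mem_cons_self ..)) hp)
    intro y hy x' hx'
    rcases (PySem.List.mem_insertBy _ _ _ _).mp hy with rfl | hy
    · exact hx x' hx'
    · exact hd y hy x' (List.mem_cons_of_mem _ hx')

-- ---- facts about pvOrdB, the sorted index list of B ----
lemma pvOrdB_perm (s : List Int) : (pvOrdB s).Perm (PySem.List.pyRange 0 (s.length : Int) 1) :=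
  PySem.List.sorted_perm ..

lemma pvOrdB_length (s : List Int) : (pvOrdB s).length = s.length := by
  rw [(pvOrdB_perm s).length_eq, PySem.List.length_pyRange_one]; omega

lemma pvOrdB_mem (s : List Int) (j : Int) : j ∈ pvOrdB s ↔ 0 ≤ j ∧ j < (s.length : Int) := by
  rw [(pvOrdB_perm s).mem_iff, PySem.List.mem_pyRange_one]

lemma pvOrdB_pairwise (s : List Int) : (pvOrdB s).Pairwise (pvLexLt s) := by
  rw [pvOrdB, PySem.List.sorted_eq_foldl_insertBy]
  exact pvFoldl_insert_pairwise s (PySem.List.pyRange 0 (s.length : Int) 1) []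
    (PySem.List.pairwise_lt_pyRange_one 0 _) (by simp) List.Pairwise.nil

lemma pvOrdB_lexLt (s : List Int) {a b : Nat} (hab : a < b) (hb : b < (pvOrdB s).length) :
    pvLexLt s ((pvOrdB s)[a]'(lt_trans hab hb)) ((pvOrdB s)[b]'hb) := by
  have := List.pairwise_iff_get.mp (pvOrdB_pairwise s) ⟨a, lt_trans hab hb⟩ ⟨b, hb⟩ hab
  simpa using this

-- ---- the current array determined by the zeroed mask ----
def curL (s : List Int) (z : List Bool) : List Int :=
  (List.range s.length).map (fun q => if z.getD q false = true then 0 else s.getD q 0)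

lemma curL_length (s : List Int) (z : List Bool) : (curL s z).length = s.length := by
  simp [curL]

lemma curL_getD (s : List Int) (z : List Bool) (q : Nat) (hq : q < s.length) :
    (curL s z).getD q 0 = if z.getD q false = true then 0 else s.getD q 0 := by
  simp [curL, List.getD_eq_getElem?_getD, hq]

-- ---- the pointer invariant of B's loop ----
def PInv (order : List Int) (z : List Bool) (p : Int) : Prop :=
  0 ≤ p ∧ p ≤ (order.length : Int) ∧
  ∀ q : Nat, (q : Int) < p → z.getD (PySem.List.pyGetD order (q : Int) 0).toNat false = true

-- ---- A's argmax characterisation ----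
def pvIsArgmax (l : List Int) (j : Int) : Prop :=
  0 ≤ j ∧ j < (l.length : Int) ∧
  (∀ q : Nat, q < l.length → l.getD q 0 ≤ l.getD j.toNat 0) ∧
  (∀ q : Nat, (q : Int) < j → l.getD q 0 < l.getD j.toNat 0)

lemma pvArgmax_unique (l : List Int) (i j : Int) (hi : pvIsArgmax l i)
    (hj : pvIsArgmax l j) : i = j := by
  obtain ⟨hi0, hi1, hi2, hi3⟩ := hi
  obtain ⟨hj0, hj1, hj2, hj3⟩ := hj
  by_contra hne
  rcases lt_trichotomy i j with h | h | h
  · have h1 := hj3 i.toNat (by omega)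
    have h2 := hi2 j.toNat (by omega)
    omega
  · exact hne h
  · have h1 := hi3 j.toNat (by omega)
    have h2 := hj2 i.toNat (by omega)
    omega

lemma pvArgmaxA_spec (l : List Int) (h : l ≠ []) :
    pvIsArgmax l (pvIdxA l (pvMaxA l)) ∧ l.getD (pvIdxA l (pvMaxA l)).toNat 0 = pvMaxA l := by
  rcases e : PySem.List.max? l (fun x => x) with _ | m
  · exact absurd ((PySem.List.max?_eq_none_iff l _).mp e) h
  · have hmem := PySem.List.max?_mem e
    have hmax := PySem.List.max?_isMax e
    rcases Option.isSome_iff_exists.mp ((PySem.List.index?_isSome_iff l m).mpr hmem) with ⟨j, ej⟩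
    obtain ⟨hk, hjm, hjfirst⟩ := PySem.List.getElem_of_index?_eq_some ej
    have hM : pvMaxA l = m := by simp [pvMaxA, e]
    have hI : pvIdxA l (pvMaxA l) = (j : Int) := by rw [pvIdxA, hM, ej]; rfl
    rw [hI]
    have hgd : l.getD j 0 = m := by rw [List.getD_eq_getElem l 0 hk]; exact hjm
    refine ⟨⟨Int.natCast_nonneg j, by exact_mod_cast hk, ?_, ?_⟩, ?_⟩
    · intro q hq
      rw [Int.toNat_natCast, hgd, List.getD_eq_getElem l 0 hq]
      exact hmax _ (List.getElem_mem hq)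
    · intro q hq
      have hqj : q < j := by exact_mod_cast hq
      rw [Int.toNat_natCast, hgd, List.getD_eq_getElem l 0 (lt_trans hqj hk)]
      exact lt_of_le_of_ne (hmax _ (List.getElem_mem _)) (hjfirst q hqj)
    · rw [Int.toNat_natCast, hgd, hM]

-- ---- Python %: the two neighbour indices ----
lemma pvMod_pred (i n : Int) (h0 : 0 ≤ i) (h : i < n) :
    PySem.Int.mod (i - 1) n = if i = 0 then n - 1 else i - 1 := by
  have hn : 0 < n := by omega
  rw [PySem.Int.mod_eq_emod_of_pos hn]
  split
  · rename_i h0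
    subst h0
    have h1 : (0 - 1 : Int) = (n - 1) + n * (-1) := by ring
    rw [h1, Int.add_mul_emod_self_left, Int.emod_eq_of_lt (by omega) (by omega)]
  · exact Int.emod_eq_of_lt (by omega) (by omega)

lemma pvMod_succ (i n : Int) (h0 : 0 ≤ i) (h : i < n) :
    PySem.Int.mod (i + 1) n = if i = n - 1 then 0 else i + 1 := by
  have hn : 0 < n := by omega
  rw [PySem.Int.mod_eq_emod_of_pos hn]
  split
  · rename_i h0
    rw [show i + 1 = n by omega, Int.emod_self]
  · exact Int.emod_eq_of_lt (by omega) (by omega)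

-- ---- skip loop specification ----
lemma pvSkipB_spec (order : List Int) (z : List Bool) (p : Int)
    (hord : ∀ j ∈ order, 0 ≤ j) (h0 : 0 ≤ p) (h1 : p ≤ (order.length : Int))
    (h2 : ∀ q : Nat, (q : Int) < p → z.getD (PySem.List.pyGetD order (q : Int) 0).toNat false = true) :
    p ≤ pvSkipB order z p ∧ pvSkipB order z p ≤ (order.length : Int) ∧
    (∀ q : Nat, (q : Int) < pvSkipB order z p →
      z.getD (PySem.List.pyGetD order (q : Int) 0).toNat false = true) ∧
    (pvSkipB order z p < (order.length : Int) →
      z.getD (PySem.List.pyGetD order (pvSkipB order z p) 0).toNat false = false) := by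
  rw [pvSkipB]
  split
  · rename_i h
    have hc : 0 ≤ PySem.List.pyGetD order p 0 := by
      rw [PySem.List.pyGetD_eq_getElem order 0 h0 h.1]
      exact hord _ (List.getElem_mem _)
    have hz : z.getD (PySem.List.pyGetD order p 0).toNat false = true := by
      rw [← PySem.List.pyGetD_of_nonneg z false hc]
      exact h.2
    have ih := pvSkipB_spec order z (p + 1) hord (by omega) (by omega) ?_
    · exact ⟨by omega, ih.2.1, ih.2.2.1, ih.2.2.2⟩
    · intro q hq
      by_cases hqp : (q : Int) < p
      · exact h2 q hqp
      · have hqe : (q : Int) = p := by omega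
        rw [hqe]
        exact hz
  · rename_i h
    refine ⟨le_refl p, h1, h2, ?_⟩
    intro hlt
    have hc : 0 ≤ PySem.List.pyGetD order p 0 := by
      rw [PySem.List.pyGetD_eq_getElem order 0 h0 hlt]
      exact hord _ (List.getElem_mem _)
    have := not_and.mp h hlt
    rw [← PySem.List.pyGetD_of_nonneg z false hc]
    simpa using this
termination_by ((order.length : Int) - p).toNat
decreasing_by omega

-- ---- getD after set, with the default ----
lemma pvGetD_set {α : Type} (w : List α) (t : Nat) (v d : α) (q : Nat) :
    (w.set t v).getD q d = if t = q ∧ q < w.length then v else w.getD q d := by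
  by_cases hq : q < w.length
  · rw [List.getD_eq_getElem _ d (by simpa using hq), List.getElem_set]
    split_ifs with h1 h2 h3
    · rfl
    · exact absurd ⟨h1, hq⟩ h2
    · exact absurd h3.1 h1
    · exact (List.getD_eq_getElem _ d hq).symm
  · rw [List.getD_eq_default _ d (by simpa using (by omega : w.length ≤ q)),
      List.getD_eq_default _ d (by omega), if_neg (by omega)]

-- ---- the updated mask of one pick of B ----
lemma pvZMask (s : List Int) (z : List Bool) (i : Int) (hz : z.length = s.length)
    (h0 : 0 ≤ i) (h1 : i < (s.length : Int)) (q : Nat) (hq : q < s.length) :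
    ((pvMark z i (s.length : Int)).getD q false = true)
      ↔ ((q : Int) = PySem.Int.mod (i - 1) (s.length : Int) ∨ (q : Int) = i
          ∨ (q : Int) = PySem.Int.mod (i + 1) (s.length : Int) ∨ z.getD q false = true) := by
  have hn : (0 : Int) < (s.length : Int) := by omega
  have ha0 : 0 ≤ PySem.Int.mod (i - 1) (s.length : Int) := PySem.Int.mod_nonneg _ hn
  have hb0 : 0 ≤ PySem.Int.mod (i + 1) (s.length : Int) := PySem.Int.mod_nonneg _ hn
  have ha1 : PySem.Int.mod (i - 1) (s.length : Int) < (s.length : Int) := PySem.Int.mod_lt _ hn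
  have hb1 : PySem.Int.mod (i + 1) (s.length : Int) < (s.length : Int) := PySem.Int.mod_lt _ hn
  rw [pvMark, PySem.List.pySetD_of_nonneg _ _ ha0, PySem.List.pySetD_of_nonneg _ _ h0,
    PySem.List.pySetD_of_nonneg _ _ hb0]
  have e1 : ((PySem.Int.mod (i - 1) (s.length : Int)).toNat = q ∧ q < s.length)
      ↔ ((q : Int) = PySem.Int.mod (i - 1) (s.length : Int)) := by
    constructor <;> (intro h; omega)
  have e2 : (i.toNat = q ∧ q < s.length) ↔ ((q : Int) = i) := by
    constructor <;> (intro h; omega)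
  have e3 : ((PySem.Int.mod (i + 1) (s.length : Int)).toNat = q ∧ q < s.length)
      ↔ ((q : Int) = PySem.Int.mod (i + 1) (s.length : Int)) := by
    constructor <;> (intro h; omega)
  rw [pvGetD_set, pvGetD_set, pvGetD_set]
  simp only [List.length_set, hz, e1, e2, e3]
  split_ifs <;> tauto

lemma pvMark_length (s : List Int) (z : List Bool) (i : Int) :
    (pvMark z i (s.length : Int)).length = z.length := by
  simp [pvMark, PySem.List.length_pySetD]

-- ---- one zeroing step of A, described pointwise ----
lemma pvZeroA_length (l : List Int) (j : Int) : (pvZeroA l j).length = l.length := by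
  rw [pvZeroA]; split_ifs <;> simp [PySem.List.length_pySetD]

lemma pvSetD_neg_one {α : Type} (xs : List α) (v : α) (h : xs ≠ []) :
    PySem.List.pySetD xs (-1) v = xs.set (xs.length - 1) v := by
  have hl : 0 < xs.length := List.length_pos_iff.mpr h
  rw [PySem.List.pySetD, PySem.List.pySet?, PySem.List.pyIdx?]
  rw [if_neg (by omega), if_pos (by omega)]
  simp

lemma pvZeroA_getD (l : List Int) (i : Int) (h0 : 0 ≤ i) (h1 : i < (l.length : Int))
    (q : Nat) (hq : q < l.length) :
    (pvZeroA l i).getD q 0 =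
      if (q : Int) = PySem.Int.mod (i - 1) (l.length : Int) ∨ (q : Int) = i
          ∨ (q : Int) = PySem.Int.mod (i + 1) (l.length : Int) then 0
      else l.getD q 0 := by
  have hn : (0 : Int) < (l.length : Int) := by omega
  rw [pvZeroA, pvMod_pred i _ h0 h1, pvMod_succ i _ h0 h1]
  by_cases hlast : i = (l.length : Int) - 1
  · rw [if_pos hlast]
    by_cases hone : i = 0
    · -- single-element list: all three assignments hit index 0
      have hlen : l.length = 1 := by omega
      have hne : (PySem.List.pySetD (PySem.List.pySetD l 0 0) i 0) ≠ [] := by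
        intro hcon
        have := congrArg List.length hcon
        simp [PySem.List.length_pySetD, hlen] at this
      rw [show i - 1 = -1 by omega, pvSetD_neg_one _ _ hne,
        PySem.List.pySetD_of_nonneg _ _ h0, PySem.List.pySetD_of_nonneg _ _ (le_refl 0)]
      rw [pvGetD_set, pvGetD_set, pvGetD_set]
      simp only [List.length_set]
      split_ifs <;> simp_all
    · rw [PySem.List.pySetD_of_nonneg _ _ (by omega : (0:Int) ≤ i - 1),
        PySem.List.pySetD_of_nonneg _ _ h0, PySem.List.pySetD_of_nonneg _ _ (le_refl 0)]
      rw [pvGetD_set, pvGetD_set, pvGetD_set]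
      simp only [List.length_set]
      split_ifs <;> simp_all <;> omega
  · rw [if_neg hlast]
    by_cases hzero : i = 0
    · rw [if_pos hzero]
      rw [PySem.List.pySetD_of_nonneg _ _ (by omega : (0:Int) ≤ i + 1),
        PySem.List.pySetD_of_nonneg _ _ h0,
        PySem.List.pySetD_of_nonneg _ _ (by omega : (0:Int) ≤ (l.length : Int) - 1)]
      rw [pvGetD_set, pvGetD_set, pvGetD_set]
      simp only [List.length_set]
      split_ifs <;> simp_all <;> omega
    · rw [if_neg hzero]
      rw [PySem.List.pySetD_of_nonneg _ _ (by omega : (0:Int) ≤ i + 1),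
        PySem.List.pySetD_of_nonneg _ _ h0,
        PySem.List.pySetD_of_nonneg _ _ (by omega : (0:Int) ≤ i - 1)]
      rw [pvGetD_set, pvGetD_set, pvGetD_set]
      simp only [List.length_set]
      split_ifs <;> simp_all <;> omega

-- ---- A's zeroing step equals B's mask update, through curL ----
lemma pvZeroA_curL (s : List Int) (z : List Bool) (i : Int) (hz : z.length = s.length)
    (h0 : 0 ≤ i) (h1 : i < (s.length : Int)) :
    pvZeroA (curL s z) i = curL s (pvMark z i (s.length : Int)) := by
  apply List.ext_getElem (by rw [pvZeroA_length, curL_length, curL_length])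
  intro q hq1 hq2
  have hq : q < s.length := by
    have := hq2
    rwa [curL_length] at this
  rw [← List.getD_eq_getElem (pvZeroA (curL s z) i) 0 hq1,
    ← List.getD_eq_getElem (curL s (pvMark z i (s.length : Int))) 0 hq2]
  rw [pvZeroA_getD (curL s z) i (by omega) (by rw [curL_length]; omega) q
    (by rw [curL_length]; omega)]
  rw [curL_length]
  rw [curL_getD s (pvMark z i (s.length : Int)) q hq]
  by_cases hd : ((q : Int) = PySem.Int.mod (i - 1) (s.length : Int) ∨ (q : Int) = i
      ∨ (q : Int) = PySem.Int.mod (i + 1) (s.length : Int))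
  · rw [if_pos hd, if_pos (show (pvMark z i (s.length : Int)).getD q false = true from
      (pvZMask s z i hz h0 h1 q hq).mpr (by tauto))]
  · rw [if_neg hd]
    rw [curL_getD s z q hq]
    have hmask : (pvMark z i (s.length : Int)).getD q false = z.getD q false := by
      cases hzq : z.getD q false with
      | true => exact (pvZMask s z i hz h0 h1 q hq).mpr (Or.inr (Or.inr (Or.inr hzq)))
      | false =>
        cases hzq' : (pvMark z i (s.length : Int)).getD q false with
        | false => rfl
        | true =>
          exfalso
          rcases (pvZMask s z i hz h0 h1 q hq).mp hzq' with h | h | h | h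
          · exact hd (Or.inl h)
          · exact hd (Or.inr (Or.inl h))
          · exact hd (Or.inr (Or.inr h))
          · rw [hzq] at h; exact Bool.false_ne_true h
    rw [hmask]

-- ---- a non-zeroed index sits at or after the pointer in B's order ----
lemma pvAfter (s : List Int) (z : List Bool) (p : Int) (hp : PInv (pvOrdB s) z p)
    (q : Nat) (hq : q < s.length) (hzq : z.getD q false = false) :
    ∃ r : Nat, ∃ hr : r < (pvOrdB s).length, ((pvOrdB s)[r]'hr) = (q : Int) ∧
      ¬ ((r : Int) < pvSkipB (pvOrdB s) z p) := by
  obtain ⟨hp0, hp1, hp2⟩ := hp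
  have hord : ∀ j ∈ pvOrdB s, 0 ≤ j := fun j hj => ((pvOrdB_mem s j).mp hj).1
  obtain ⟨hsk0, hsk1, hsk2, hsk3⟩ := pvSkipB_spec (pvOrdB s) z p hord hp0 hp1 hp2
  obtain ⟨r, hr, hrq⟩ := List.mem_iff_getElem.mp
    ((pvOrdB_mem s (q : Int)).mpr ⟨by omega, by omega⟩)
  refine ⟨r, hr, hrq, ?_⟩
  intro hcon
  have hzr := hsk2 r hcon
  rw [PySem.List.pyGetD_eq_getElem _ 0 (by omega) (by omega)] at hzr
  simp only [Int.toNat_natCast] at hzr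
  rw [hrq] at hzr
  simp only [Int.toNat_natCast] at hzr
  rw [hzq] at hzr
  exact Bool.false_ne_true hzr

-- ---- when the candidate exists and beats every zeroed slot, A picks it ----
lemma pvPick (s : List Int) (z : List Bool) (p : Int)
    (hp : PInv (pvOrdB s) z p)
    (hlt : pvSkipB (pvOrdB s) z p < (s.length : Int))
    (hbeat : ∀ q : Nat, q < s.length → z.getD q false = true →
      0 < PySem.List.pyGetD s (PySem.List.pyGetD (pvOrdB s) (pvSkipB (pvOrdB s) z p) 0) 0) :
    pvIdxA (curL s z) (pvMaxA (curL s z))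
        = PySem.List.pyGetD (pvOrdB s) (pvSkipB (pvOrdB s) z p) 0
  ∧ pvMaxA (curL s z)
        = PySem.List.pyGetD s (PySem.List.pyGetD (pvOrdB s) (pvSkipB (pvOrdB s) z p) 0) 0 := by
  set p' := pvSkipB (pvOrdB s) z p with hp'def
  set c := PySem.List.pyGetD (pvOrdB s) p' 0 with hcdef
  set v := PySem.List.pyGetD s c 0 with hvdef
  obtain ⟨hp0, hp1, hp2⟩ := hp
  have hord : ∀ j ∈ pvOrdB s, 0 ≤ j := fun j hj => ((pvOrdB_mem s j).mp hj).1
  obtain ⟨hsk0, hsk1, hsk2, hsk3⟩ := pvSkipB_spec (pvOrdB s) z p hord hp0 hp1 hp2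
  have hOlen : (pvOrdB s).length = s.length := pvOrdB_length s
  have hcget : c = (pvOrdB s)[p'.toNat]'(by omega) :=
    PySem.List.pyGetD_eq_getElem _ 0 (by omega) (by omega)
  obtain ⟨hc0, hc1⟩ : 0 ≤ c ∧ c < (s.length : Int) := by
    rw [hcget]; exact (pvOrdB_mem s _).mp (List.getElem_mem _)
  have hcz : z.getD c.toNat false = false := by
    have := hsk3 (by omega)
    rw [← PySem.List.pyGetD_of_nonneg z false hc0]
    rwa [PySem.List.pyGetD_of_nonneg z false hc0]
  have hvc : v = s.getD c.toNat 0 := PySem.List.pyGetD_of_nonneg _ _ hc0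
  have hcurc : (curL s z).getD c.toNat 0 = v := by
    rw [curL_getD s z c.toNat (by omega), hcz]
    simp [hvc]
  have hkey : ∀ j : Int, 0 ≤ j → pvKey s j = -(s.getD j.toNat 0) := by
    intro j hj
    rw [pvKey, PySem.List.pyGetD_of_nonneg _ _ hj]
  have hargmax : pvIsArgmax (curL s z) c := by
    refine ⟨hc0, by rw [curL_length]; omega, ?_, ?_⟩
    · intro q hq
      rw [curL_length] at hq
      rw [curL_getD s z q hq, hcurc]
      by_cases hzq : z.getD q false = true
      · rw [if_pos hzq]
        have := hbeat q hq hzq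
        omega
      · rw [if_neg hzq]
        obtain ⟨r, hr, hrq, hrge⟩ := pvAfter s z p ⟨hp0, hp1, hp2⟩ q hq
          (by rwa [← Bool.not_eq_true])
        by_cases hre : p'.toNat = r
        · have hcq : c = (q : Int) := by subst hre; rw [hcget]; exact hrq
          rw [hvc, show c.toNat = q by omega]
        · have hlex := pvOrdB_lexLt s (show p'.toNat < r by omega) hr
          rw [← hcget, hrq] at hlex
          have k1 := hkey c hc0
          have k2 := hkey (q : Int) (by omega)
          simp only [Int.toNat_natCast] at k2
          rcases hlex with hl | ⟨hl1, _⟩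
          · rw [k1, k2] at hl; omega
          · rw [k1, k2] at hl1; omega
    · intro q hq
      have hqlen : q < s.length := by omega
      rw [curL_getD s z q hqlen, hcurc]
      by_cases hzq : z.getD q false = true
      · rw [if_pos hzq]
        exact hbeat q hqlen hzq
      · rw [if_neg hzq]
        obtain ⟨r, hr, hrq, hrge⟩ := pvAfter s z p ⟨hp0, hp1, hp2⟩ q hqlen
          (by rwa [← Bool.not_eq_true])
        by_cases hre : p'.toNat = r
        · exfalso
          have hcq : c = (q : Int) := by subst hre; rw [hcget]; exact hrq
          omega
        · have hlex := pvOrdB_lexLt s (show p'.toNat < r by omega) hr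
          rw [← hcget, hrq] at hlex
          have k1 := hkey c hc0
          have k2 := hkey (q : Int) (by omega)
          simp only [Int.toNat_natCast] at k2
          rcases hlex with hl | ⟨hl1, hl2⟩
          · rw [k1, k2] at hl; omega
          · omega
  have hcurne : curL s z ≠ [] :=
    List.ne_nil_of_length_pos (by rw [curL_length]; omega)
  obtain ⟨hAmax, hAval⟩ := pvArgmaxA_spec (curL s z) hcurne
  have hidx : pvIdxA (curL s z) (pvMaxA (curL s z)) = c :=
    pvArgmax_unique _ _ _ hAmax hargmax
  refine ⟨hidx, ?_⟩
  rw [← hAval, hidx, hcurc]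

-- ---- loop unfoldings ----
lemma pvLoopA_pos (l : List Int) (k total : Int) (h : 0 < k) :
    pvLoopA l k total = pvLoopA (pvZeroA l (pvIdxA l (pvMaxA l))) (k - 1) (total + pvMaxA l) := by
  rw [pvLoopA, dif_pos h]

-- ---- once every non-zeroed value is ≤ 0, A's loop adds nothing any more ----
lemma pvDead (s : List Int) : ∀ (f : Nat) (k : Int), k.toNat = f →
    ∀ (z : List Bool) (total : Int), z.length = s.length →
    (∃ q : Nat, q < s.length ∧ z.getD q false = true) →
    (∀ q : Nat, q < s.length → z.getD q false = false → s.getD q 0 ≤ 0) →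
    pvLoopA (curL s z) k total = total
  | 0, k, hk, z, total, _, _, _ => by
    rw [pvLoopA, dif_neg (by omega)]
  | f + 1, k, hk, z, total, hz, hex, hle => by
    obtain ⟨q0, hq0, hzq0⟩ := hex
    have hns : 0 < s.length := by omega
    have hcurne : curL s z ≠ [] :=
      List.ne_nil_of_length_pos (by rw [curL_length]; omega)
    obtain ⟨hAmax, hAval⟩ := pvArgmaxA_spec (curL s z) hcurne
    set j := pvIdxA (curL s z) (pvMaxA (curL s z)) with hjdef
    obtain ⟨hj0, hj1, hj2, _⟩ := hAmax
    rw [curL_length] at hj1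
    have hcurq0 : (curL s z).getD q0 0 = 0 := by
      rw [curL_getD s z q0 hq0, hzq0]; simp
    have hmax0 : pvMaxA (curL s z) = 0 := by
      have hlo := hj2 q0 (by rw [curL_length]; omega)
      rw [hcurq0] at hlo
      have hhi : (curL s z).getD j.toNat 0 ≤ 0 := by
        rw [curL_getD s z j.toNat (by omega)]
        split
        · exact le_refl 0
        · rename_i hzj
          exact hle j.toNat (by omega) (by rwa [← Bool.not_eq_true])
      omega
    rw [pvLoopA_pos _ _ _ (by omega : (0:Int) < k)]
    rw [← hjdef, hmax0, add_zero]
    rw [pvZeroA_curL s z j hz hj0 hj1]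
    refine pvDead s f (k - 1) (by omega) (pvMark z j (s.length : Int)) total
      (by rw [pvMark_length, hz]) ⟨j.toNat, by omega, ?_⟩ ?_
    · exact (pvZMask s z j hz hj0 hj1 j.toNat (by omega)).mpr (Or.inr (Or.inl (by omega)))
    · intro q hq hzq
      refine hle q hq ?_
      cases hzq' : z.getD q false with
      | false => rfl
      | true =>
        exfalso
        have := (pvZMask s z j hz hj0 hj1 q hq).mpr (Or.inr (Or.inr (Or.inr hzq')))
        rw [hzq] at this
        exact Bool.false_ne_true this

-- ---- the main loop equivalence ----
lemma pvLoop_eq (s : List Int) : ∀ (f : Nat) (k : Int), k.toNat = f →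
    ∀ (z : List Bool) (p total : Int), z.length = s.length →
    (∃ q : Nat, q < s.length ∧ z.getD q false = true) →
    PInv (pvOrdB s) z p →
    pvLoopA (curL s z) k total
      = pvLoopB s (pvOrdB s) (s.length : Int) z p total f
  | 0, k, hk, z, p, total, hz, hex, hp => by
    rw [pvLoopA, dif_neg (by omega)]
    rfl
  | f + 1, k, hk, z, p, total, hz, hex, hp => by
    have h0k : 0 < k := by omega
    obtain ⟨hp0, hp1, hp2⟩ := hp
    have hord : ∀ j ∈ pvOrdB s, 0 ≤ j := fun j hj => ((pvOrdB_mem s j).mp hj).1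
    obtain ⟨hsk0, hsk1, hsk2, hsk3⟩ := pvSkipB_spec (pvOrdB s) z p hord hp0 hp1 hp2
    have hOlen : (pvOrdB s).length = s.length := pvOrdB_length s
    set p' := pvSkipB (pvOrdB s) z p with hp'def
    set c := PySem.List.pyGetD (pvOrdB s) p' 0 with hcdef
    set v := PySem.List.pyGetD s c 0 with hvdef
    rw [pvLoopB]
    by_cases hbr : p' = (s.length : Int) ∨ v ≤ 0
    · rw [if_pos (by simpa [← hp'def, ← hcdef, ← hvdef] using hbr)]
      refine pvDead s (f + 1) k hk z total hz hex ?_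
      intro q hq hzq
      obtain ⟨r, hr, hrq, hrge⟩ := pvAfter s z p ⟨hp0, hp1, hp2⟩ q hq hzq
      rcases hbr with hbr | hbr
      · exfalso
        rw [hOlen] at hr
        omega
      · have hkq : s.getD q 0 ≤ v := by
          have hcget : c = (pvOrdB s)[p'.toNat]'(by omega) :=
            PySem.List.pyGetD_eq_getElem _ 0 (by omega) (by omega)
          obtain ⟨hc0, _⟩ : 0 ≤ c ∧ c < (s.length : Int) := by
            rw [hcget]; exact (pvOrdB_mem s _).mp (List.getElem_mem _)
          have hvc : v = s.getD c.toNat 0 := PySem.List.pyGetD_of_nonneg _ _ hc0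
          by_cases hre : p'.toNat = r
          · have hcq : c = (q : Int) := by subst hre; rw [hcget]; exact hrq
            rw [hvc, show c.toNat = q by omega]
          · have hlex := pvOrdB_lexLt s (show p'.toNat < r by omega) hr
            rw [← hcget, hrq] at hlex
            have k1 : pvKey s c = -(s.getD c.toNat 0) := by
              rw [pvKey, PySem.List.pyGetD_of_nonneg _ _ hc0]
            have k2 : pvKey s (q : Int) = -(s.getD q 0) := by
              rw [pvKey, PySem.List.pyGetD_of_nonneg _ _ (by omega : (0:Int) ≤ (q : Int))]
              simp only [Int.toNat_natCast]
            rcases hlex with hl | ⟨hl1, _⟩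
            · rw [k1, k2] at hl; rw [hvc]; omega
            · rw [k1, k2] at hl1; rw [hvc]; omega
        omega
    · rw [if_neg (by simpa [← hp'def, ← hcdef, ← hvdef] using hbr)]
      have hne : p' ≠ (s.length : Int) := fun hcon => hbr (Or.inl hcon)
      have hpos : 0 < v := by
        by_contra hvp
        exact hbr (Or.inr (by omega))
      have hlt : p' < (s.length : Int) := by omega
      obtain ⟨hidx, hmax⟩ := pvPick s z p ⟨hp0, hp1, hp2⟩ hlt
        (fun q hq hzq => by omega)
      have hcget : c = (pvOrdB s)[p'.toNat]'(by omega) :=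
        PySem.List.pyGetD_eq_getElem _ 0 (by omega) (by omega)
      obtain ⟨hc0, hc1⟩ : 0 ≤ c ∧ c < (s.length : Int) := by
        rw [hcget]; exact (pvOrdB_mem s _).mp (List.getElem_mem _)
      rw [pvLoopA_pos _ _ _ h0k, hidx, hmax, pvZeroA_curL s z c hz hc0 hc1]
      refine pvLoop_eq s f (k - 1) (by omega) (pvMark z c (s.length : Int)) p'
        (total + v) (by rw [pvMark_length, hz]) ⟨c.toNat, by omega, ?_⟩ ⟨by omega, by omega, ?_⟩
      · exact (pvZMask s z c hz hc0 hc1 c.toNat (by omega)).mpr (Or.inr (Or.inl (by omega)))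
      · intro q hq
        have hjq : PySem.List.pyGetD (pvOrdB s) (q : Int) 0 ∈ pvOrdB s := by
          rw [PySem.List.pyGetD_eq_getElem _ 0 (by omega) (by omega)]
          exact List.getElem_mem _
        obtain ⟨hj0, hj1⟩ := (pvOrdB_mem s _).mp hjq
        exact (pvZMask s z c hz hc0 hc1 _ (by omega)).mpr
          (Or.inr (Or.inr (Or.inr (hsk2 q hq))))

-- ===== VERDICT (by name: the statement is the Claim_ definition above) =====
theorem solution_spec : Claim_equal_solution := by
  unfold Claim_equal_solution
  intro s k _ hpre
  unfold Spec_solution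
  have hs : s ≠ [] := hpre
  have hns : 0 < s.length := List.length_pos_iff.mpr hs
  have hrep : ∀ q : Nat, (List.replicate s.length false).getD q false = false := by
    intro q
    by_cases h : q < s.length
    · rw [List.getD_eq_getElem _ false (by simpa using h)]
      simp
    · rw [List.getD_eq_default _ false (by simpa using (by omega : s.length ≤ q))]
  have hz0 : (List.replicate s.length false).length = s.length := by simp
  have hcur0 : curL s (List.replicate s.length false) = s := by
    apply List.ext_getElem (by rw [curL_length])
    intro q h1 h2
    rw [← List.getD_eq_getElem (curL s (List.replicate s.length false)) 0 h1,
      curL_getD s _ q (by rwa [curL_length] at h1), hrep q]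
    simp only [Bool.false_eq_true, if_false]
    rw [List.getD_eq_getElem s 0 h2]
  have hp0 : PInv (pvOrdB s) (List.replicate s.length false) 0 :=
    ⟨le_refl 0, by omega, fun q hq => absurd hq (by omega)⟩
  have hskip0 : pvSkipB (pvOrdB s) (List.replicate s.length false) 0 = 0 := by
    rw [pvSkipB]
    rw [dif_neg]
    intro hcon
    have hc : 0 ≤ PySem.List.pyGetD (pvOrdB s) 0 0 := by
      rw [PySem.List.pyGetD_eq_getElem _ 0 (le_refl 0) (by rw [pvOrdB_length]; omega)]
      exact ((pvOrdB_mem s _).mp (List.getElem_mem _)).1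
    rw [PySem.List.pyGetD_of_nonneg (List.replicate s.length false) false hc] at hcon
    rw [hrep] at hcon
    exact Bool.false_ne_true hcon.2
  obtain ⟨hidx, hmax⟩ := pvPick s (List.replicate s.length false) 0 hp0
    (by rw [hskip0]; omega)
    (fun q hq hzq => absurd hzq (by rw [hrep q]; exact Bool.false_ne_true))
  rw [hskip0] at hidx hmax
  rw [hcur0] at hidx hmax
  set first := PySem.List.pyGetD (pvOrdB s) 0 0 with hfirstdef
  obtain ⟨hf0, hf1⟩ : 0 ≤ first ∧ first < (s.length : Int) := by
    rw [hfirstdef, PySem.List.pyGetD_eq_getElem _ 0 (le_refl 0) (by rw [pvOrdB_length]; omega)]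
    exact (pvOrdB_mem s _).mp (List.getElem_mem _)
  have hA : solution s k = pvLoopA (pvZeroA s (pvIdxA s (pvMaxA s))) (k - 1) (0 + pvMaxA s) := rfl
  have hB : solution_alt s k
      = pvLoopB s (pvOrdB s) (s.length : Int)
          (pvMark (List.replicate s.length false) first (s.length : Int)) 0
          (PySem.List.pyGetD s first 0) (k - 1).toNat := rfl
  rw [hA, hB, hidx, hmax]
  have hzero : pvZeroA s first
      = curL s (pvMark (List.replicate s.length false) first (s.length : Int)) := by
    rw [show pvZeroA s first = pvZeroA (curL s (List.replicate s.length false)) first by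
        rw [hcur0]]
    exact pvZeroA_curL s _ first hz0 hf0 hf1
  rw [hzero, zero_add]
  exact pvLoop_eq s (k - 1).toNat (k - 1) rfl _ 0 _
    (by rw [pvMark_length, hz0]) ⟨first.toNat, by omega,
      (pvZMask s _ first hz0 hf0 hf1 first.toNat (by omega)).mpr (Or.inr (Or.inl (by omega)))⟩
    ⟨le_refl 0, by rw [pvOrdB_length]; omega, fun q hq => absurd hq (by omega)⟩
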